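-- pv_equiv track=rewrite | github.com/vpc20/python-algorithms | RecursionExercises.py | is_an_element_of
-- ===== SOURCE A (Python) =====
-- def head(lst):
--     return lst[0]
--
-- def tail(lst):
--     return lst[1:]
--
-- def is_an_element_of(e, lst):
--     if lst:
--         if head(lst) == e:
--             return True
--         else:
--             return is_an_element_of(e, tail(lst))
--     else:
--         return False
-- ===== SOURCE B (Python) =====
-- def is_an_element_of(e, lst):
--     found = False
--     for x in lst:
--         found = found or x == e
--     return found
-- ===== Notes on version B (the rewrite author's own statement) =====
-- stated objective: faster
-- what changed: Replaces the structural recursion with head/tail helper slicing (each tail() copies the rest of the list) by a single iterative pass maintaining a boolean accumulator.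
import Mathlib
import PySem

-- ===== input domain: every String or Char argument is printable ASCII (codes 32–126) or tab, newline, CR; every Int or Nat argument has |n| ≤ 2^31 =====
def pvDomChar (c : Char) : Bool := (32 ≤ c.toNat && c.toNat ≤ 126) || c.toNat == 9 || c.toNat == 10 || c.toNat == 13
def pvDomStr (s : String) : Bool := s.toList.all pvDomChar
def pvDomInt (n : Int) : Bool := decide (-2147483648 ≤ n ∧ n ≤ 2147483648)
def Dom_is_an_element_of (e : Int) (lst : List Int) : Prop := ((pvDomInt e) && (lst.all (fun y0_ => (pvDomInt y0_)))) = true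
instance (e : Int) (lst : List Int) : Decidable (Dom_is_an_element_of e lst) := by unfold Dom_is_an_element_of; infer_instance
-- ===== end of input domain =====

-- B replaces A's head/tail structural recursion by one iterative pass with a boolean accumulator; return values identical.

-- ===== PORT A =====
-- head(lst) = lst[0], tail(lst) = lst[1:]; the recursion matches on emptiness exactly as `if lst:` does
def is_an_element_of (e : Int) (lst : List Int) : Bool :=
  match lst with
  | [] => false
  | x :: xs => if x == e then true else is_an_element_of e xs

-- ===== PORT B =====
-- the `for x in lst` loop with accumulator `found = found or x == e`
def is_an_element_of_alt (e : Int) (lst : List Int) : Bool :=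
  lst.foldl (fun found x => found || (x == e)) false

-- ===== PRECONDITION & SPEC =====
def Spec_is_an_element_of (e : Int) (lst : List Int) (out : Bool) : Prop := out = is_an_element_of_alt e lst
instance (e : Int) (lst : List Int) (out : Bool) : Decidable (Spec_is_an_element_of e lst out) := by unfold Spec_is_an_element_of; infer_instance

-- ===== CLAIM (what is proved, stated in full; the proofs are below) =====
def Claim_equal_is_an_element_of : Prop := ∀ (e : Int) (lst : List Int), Dom_is_an_element_of e lst → Spec_is_an_element_of e lst (is_an_element_of e lst)

-- ===== LEMMAS AND PROOFS =====
theorem foldl_or_true (e : Int) (lst : List Int) :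
    lst.foldl (fun found x => found || (x == e)) true = true := by
  induction lst with
  | nil => rfl
  | cons x xs ih => simpa using ih

theorem isel_eq (e : Int) (lst : List Int) :
    is_an_element_of e lst = is_an_element_of_alt e lst := by
  induction lst with
  | nil => rfl
  | cons x xs ih =>
    simp only [is_an_element_of, is_an_element_of_alt, List.foldl_cons, Bool.false_or]
    by_cases h : x == e
    · simp [h, foldl_or_true]
    · simp [h, ih, is_an_element_of_alt]

-- ===== VERDICT (by name: the statement is the Claim_ definition above) =====
theorem is_an_element_of_spec : Claim_equal_is_an_element_of := by
  intro e lst _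
  exact isel_eq e lst
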